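-- pv_equiv track=rewrite | github.com/pypi-data/pypi-mirror-123 | packages/socket-request/socket_request-0.1.22-py3-none-any.whl/socket_request/control_chain_cli.py | check_required
-- ===== SOURCE A (Python) =====
-- def check_required(command=None):
--     required_params = {
--         "payload": ["import_icon"],
--         "inspect": ["view_chain"],
--         "seedAddress": ["join"]
--     }
--
--     required_keys = []
--
--     for required_key, required_cmd in required_params.items():
--         if command in required_cmd:
--             required_keys.append(required_key)
--
--     return required_keys
-- ===== SOURCE B (Python) =====
-- def check_required(command=None):
--     owner_by_command = {
--         "import_icon": "payload",
--         "view_chain": "inspect",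
--         "join": "seedAddress",
--     }
--     if command in owner_by_command:
--         return [owner_by_command[command]]
--     return []
-- ===== Notes on version B (the rewrite author's own statement) =====
-- stated objective: idiomatic
-- what changed: Replaces the loop over the key->commands dict testing membership in each command list with a prebuilt inverse command->key dict and a single direct lookup.
import Mathlib
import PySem

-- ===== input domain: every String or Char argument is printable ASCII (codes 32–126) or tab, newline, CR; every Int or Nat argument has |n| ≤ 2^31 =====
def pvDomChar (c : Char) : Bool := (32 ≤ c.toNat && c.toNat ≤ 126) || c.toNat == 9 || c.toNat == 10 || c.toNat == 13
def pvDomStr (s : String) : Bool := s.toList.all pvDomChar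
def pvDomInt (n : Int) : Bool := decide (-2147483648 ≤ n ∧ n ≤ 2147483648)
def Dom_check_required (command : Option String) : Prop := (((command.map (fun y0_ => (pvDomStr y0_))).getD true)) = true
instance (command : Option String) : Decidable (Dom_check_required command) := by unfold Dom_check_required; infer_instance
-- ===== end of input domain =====

-- B replaces the per-entry membership loop with an inverse command->key dict and a single lookup (idiomatic).


-- ===== PORT A =====
-- literal port: loop over the dict's items, appending each key whose command list contains `command`
def check_required (command : Option String) : List String :=
  let required_params : PySem.Dict String (List String) :=
    (((PySem.Dict.empty.insert "payload" ["import_icon"]).insert "inspect" ["view_chain"]).insert "seedAddress" ["join"])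
  let required_keys : List String := []
  required_params.items.foldl
    (fun required_keys item =>
      -- `command in required_cmd`: None is never a member of a list of strings
      if (match command with | some c => item.2.contains c | none => false) then
        required_keys ++ [item.1]
      else required_keys)
    required_keys

-- ===== PORT B =====
-- inverse dict, single lookup
def check_required_alt (command : Option String) : List String :=
  let owner_by_command : PySem.Dict String String :=
    (((PySem.Dict.empty.insert "import_icon" "payload").insert "view_chain" "inspect").insert "join" "seedAddress")
  match command with
  | some c =>
    match owner_by_command.get? c with
    | some k => [k]
    | none => []
  | none => []

-- ===== PRECONDITION & SPEC =====
def Spec_check_required (command : Option String) (out : List String) : Prop := out = check_required_alt command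
instance (command : Option String) (out : List String) : Decidable (Spec_check_required command out) := by unfold Spec_check_required; infer_instance

-- ===== CLAIM (what is proved, stated in full; the proofs are below) =====
def Claim_equal_check_required : Prop := ∀ (command : Option String), Dom_check_required command → Spec_check_required command (check_required command)

-- ===== LEMMAS AND PROOFS =====

-- ===== VERDICT (by name: the statement is the Claim_ definition above) =====
theorem check_required_spec : Claim_equal_check_required := by
  intro command _
  unfold Spec_check_required check_required check_required_alt
  match command with
  | none => decide
  | some c =>
    by_cases h1 : c = "import_icon" <;> by_cases h2 : c = "view_chain" <;> by_cases h3 : c = "join" <;>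
    · first
      | subst h1; decide
      | subst h2; decide
      | subst h3; decide
      | (have e1 : ("import_icon" == c) = false := by simpa using fun h => h1 h.symm
         have e2 : ("view_chain" == c) = false := by simpa using fun h => h2 h.symm
         have e3 : ("join" == c) = false := by simpa using fun h => h3 h.symm
         simp [PySem.Dict.insert, PySem.Dict.empty, PySem.Dict.get?,
           PySem.Dict.contains, List.find?, e1, e2, e3, h1, h2, h3])
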